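-- pv_equiv track=rewrite | github.com/mastersb/adventofcode | 2020/6/main.py | combine_answers_part_2
-- ===== SOURCE A (Python) =====
-- def combine_answers_part_2(answers, size):
--     a = {}
--
--     for c in answers:
--         if c in a.keys():
--             a[c] += 1
--         else:
--             a[c] = 1
--
--     out = 0
--     for c in answers:
--         if a[c] == size:
--             out += 1
--             a[c] = -1
--
--     return out
-- ===== SOURCE B (Python) =====
-- def combine_answers_part_2(answers, size):
--     counts = {}
--     for c in answers:
--         counts[c] = counts.get(c, 0) + 1
--     return sum(1 for v in counts.values() if v == size)
-- ===== Notes on version B (the rewrite author's own statement) =====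
-- stated objective: simpler
-- what changed: B builds one frequency table and counts how many values equal size, eliminating A's second pass over answers and its -1 marking sentinel.
import Mathlib
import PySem

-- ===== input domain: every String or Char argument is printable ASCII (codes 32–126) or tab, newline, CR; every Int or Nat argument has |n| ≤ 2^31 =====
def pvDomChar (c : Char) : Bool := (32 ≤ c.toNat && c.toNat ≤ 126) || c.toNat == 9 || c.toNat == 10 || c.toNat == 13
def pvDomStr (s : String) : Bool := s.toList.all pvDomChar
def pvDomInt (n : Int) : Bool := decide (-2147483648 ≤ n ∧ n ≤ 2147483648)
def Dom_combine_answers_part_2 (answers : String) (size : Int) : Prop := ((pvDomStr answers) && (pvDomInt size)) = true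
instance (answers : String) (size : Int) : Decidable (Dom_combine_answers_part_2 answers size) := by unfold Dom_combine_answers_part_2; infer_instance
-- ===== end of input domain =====

-- B replaces A's second pass over answers (with its -1 marking sentinel) by a single count
-- over the frequency table's values (objective: simpler). Return-value equivalence; neither mutates its arguments.

-- ===== PORT A =====
def combine_answers_part_2 (answers : String) (size : Int) : Int :=
  let a : PySem.Dict Char Int :=
    answers.toList.foldl
      (fun a c => if a.contains c then a.modify c 0 (· + 1) else a.insert c 1)
      PySem.Dict.empty
  -- second loop: a[c] never raises (every c of answers is a key of a), so getD c 0 is exact here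
  (answers.toList.foldl
      (fun (st : PySem.Dict Char Int × Int) c =>
        if st.1.getD c 0 == size then (st.1.insert c (-1), st.2 + 1) else st)
      (a, 0)).2

-- ===== PORT B =====
def combine_answers_part_2_alt (answers : String) (size : Int) : Int :=
  let counts : PySem.Dict Char Int :=
    answers.toList.foldl (fun d c => d.insert c (d.getD c 0 + 1)) PySem.Dict.empty
  counts.values.foldl (fun acc v => if v == size then acc + 1 else acc) 0

-- ===== PRECONDITION & SPEC =====
def Spec_combine_answers_part_2 (answers : String) (size : Int) (out : Int) : Prop := out = combine_answers_part_2_alt answers size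
instance (answers : String) (size : Int) (out : Int) : Decidable (Spec_combine_answers_part_2 answers size out) := by unfold Spec_combine_answers_part_2; infer_instance

-- ===== CLAIM (what is proved, stated in full; the proofs are below) =====
def Claim_equal_combine_answers_part_2 : Prop := ∀ (answers : String) (size : Int), Dom_combine_answers_part_2 answers size → Spec_combine_answers_part_2 answers size (combine_answers_part_2 answers size)

-- ===== LEMMAS AND PROOFS =====

-- getD on a key the dict does not contain returns the default
theorem pv_getD_not_contains (d : PySem.Dict Char Int) (c : Char) (v : Int)
    (h : d.contains c = false) : d.getD c v = v := by
  have hfind : d.items.find? (fun p => p.1 == c) = none := by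
    rw [List.find?_eq_none]
    intro p hp
    simp [PySem.Dict.contains] at h
    simpa using h p.1 p.2 hp
  simp [PySem.Dict.getD, PySem.Dict.get?, hfind]

-- folding Set.add skips elements already in the accumulator
theorem pv_foldl_add_skip (t : List Char) : ∀ (s : PySem.Set Char) (c : Char), c ∈ s →
    t.foldl PySem.Set.add s = (t.filter (fun x => !(x == c))).foldl PySem.Set.add s := by
  induction t with
  | nil => intro s c _; rfl
  | cons x t ih =>
      intro s c hc
      by_cases hx : x = c
      · subst hx
        have hadd : PySem.Set.add s x = s := by
          simp [PySem.Set.add, PySem.Set.contains, hc]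
        rw [List.filter_cons_of_neg (by simp)]
        simp only [List.foldl, hadd]
        exact ih s x hc
      · rw [List.filter_cons_of_pos (by simp [hx])]
        simp only [List.foldl]
        exact ih (PySem.Set.add s x) c ((PySem.Set.mem_add s x c).2 (Or.inl hc))

-- folding Set.add over a list avoiding c keeps a leading c in place
theorem pv_foldl_add_cons (t : List Char) : ∀ (c : Char) (s : List Char), c ∉ t →
    t.foldl PySem.Set.add (c :: s) = c :: t.foldl PySem.Set.add s := by
  induction t with
  | nil => intro c s _; rfl
  | cons x t ih =>
      intro c s hc
      have hxc : x ≠ c := by intro h; exact hc (by simp [h])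
      have hstep : PySem.Set.add (c :: s) x = c :: PySem.Set.add s x := by
        simp [PySem.Set.add, PySem.Set.contains, hxc]
        split <;> simp
      simp [List.foldl, hstep]
      exact ih c (PySem.Set.add s x) (fun h => hc (by simp [h]))

-- Set.ofList commutes with filter
theorem pv_foldl_add_filter (p : Char → Bool) (t : List Char) : ∀ (s : List Char),
    (t.filter p).foldl PySem.Set.add (s.filter p) = (t.foldl PySem.Set.add s).filter p := by
  induction t with
  | nil => intro s; rfl
  | cons x t ih =>
      intro s
      by_cases hx : p x = true
      · have hstep : PySem.Set.add (s.filter p) x = (PySem.Set.add s x).filter p := by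
          simp [PySem.Set.add, PySem.Set.contains, List.mem_filter, hx]
          split <;> simp_all [List.filter_append, List.filter]
        simp [List.filter, hx, List.foldl, hstep]
        exact ih (PySem.Set.add s x)
      · have hstep : (PySem.Set.add s x).filter p = s.filter p := by
          simp [PySem.Set.add]
          split
          · rfl
          · simp [List.filter_append, List.filter, hx]
        simp [List.filter, hx, List.foldl, ← hstep]
        exact ih (PySem.Set.add s x)

theorem pv_ofList_filter (p : Char → Bool) (t : List Char) :
    PySem.Set.ofList (t.filter p) = (PySem.Set.ofList t).filter p := by
  have := pv_foldl_add_filter p t []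
  simpa [PySem.Set.ofList, PySem.Set.empty] using this

theorem pv_ofList_cons (c : Char) (t : List Char) :
    PySem.Set.ofList (c :: t) = c :: (PySem.Set.ofList t).filter (fun x => !(x == c)) := by
  have h1 : PySem.Set.ofList (c :: t)
      = (t.filter (fun x => !(x == c))).foldl PySem.Set.add [c] := by
    simpa [PySem.Set.ofList, PySem.Set.empty, PySem.Set.add, PySem.Set.contains]
      using pv_foldl_add_skip t [c] c (by simp)
  have h2 : (t.filter (fun x => !(x == c))).foldl PySem.Set.add ([c] : List Char)
      = c :: (t.filter (fun x => !(x == c))).foldl PySem.Set.add [] := by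
    apply pv_foldl_add_cons
    simp [List.mem_filter]
  rw [h1, h2]
  have h3 := pv_ofList_filter (fun x => !(x == c)) t
  simp only [PySem.Set.ofList, PySem.Set.empty] at h3
  rw [h3]
  rfl

-- A's second loop counts the distinct characters whose stored count equals size
theorem pv_loop2 (size : Int) : ∀ (t : List Char) (a : PySem.Dict Char Int) (out : Int),
    (size = -1 → ∀ c ∈ t, a.getD c 0 ≠ -1) →
    (t.foldl (fun (st : PySem.Dict Char Int × Int) c =>
        if st.1.getD c 0 == size then (st.1.insert c (-1), st.2 + 1) else st) (a, out)).2
      = out + ((PySem.Set.ofList t).countP (fun c => a.getD c 0 == size) : Int) := by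
  intro t
  induction t with
  | nil => intro a out _; simp [PySem.Set.ofList, PySem.Set.empty]
  | cons c t ih =>
      intro a out hinv
      by_cases hc : a.getD c 0 = size
      · -- fires: size ≠ -1 (else the invariant at c is violated)
        have hsz : size ≠ -1 := by
          intro h
          exact hinv h c (by simp) (h ▸ hc)
        have hinv' : size = -1 → ∀ c' ∈ t, (a.insert c (-1)).getD c' 0 ≠ -1 :=
          fun h => absurd h hsz
        have hcb : (a.getD c 0 == size) = true := by simp [hc]
        simp only [List.foldl, hcb, if_true]
        rw [ih (a.insert c (-1)) (out + 1) hinv']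
        rw [pv_ofList_cons]
        simp only [List.countP_cons, hcb, if_true]
        rw [List.countP_filter]
        have hcong : List.countP (fun c' => (a.insert c (-1)).getD c' 0 == size) (PySem.Set.ofList t)
            = List.countP (fun x => (a.getD x 0 == size) && !(x == c)) (PySem.Set.ofList t) := by
          apply List.countP_congr
          intro x _
          by_cases hx : x = c
          · subst hx
            simp [Ne.symm hsz]
          · simp [PySem.Dict.getD_insert, hx]
        rw [hcong]
        push_cast
        ring
      · -- does not fire
        have hinv' : size = -1 → ∀ c' ∈ t, a.getD c' 0 ≠ -1 :=
          fun h c' hm => hinv h c' (by simp [hm])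
        have hcb : (a.getD c 0 == size) = false := by simp [hc]
        simp only [List.foldl, hcb, Bool.false_eq_true, if_false]
        rw [ih a out hinv']
        rw [pv_ofList_cons]
        simp only [List.countP_cons, hcb, Bool.false_eq_true, if_false]
        rw [List.countP_filter]
        have hcong : List.countP (fun x => (a.getD x 0 == size) && !(x == c)) (PySem.Set.ofList t)
            = List.countP (fun x => a.getD x 0 == size) (PySem.Set.ofList t) := by
          apply List.countP_congr
          intro x _
          by_cases hx : x = c
          · subst hx; simp [hc]
          · simp [hx]
        rw [hcong]
        simp

-- A's first loop builds exactly the character counter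
theorem pv_build_eq_counter (l : List Char) :
    l.foldl (fun a c => if a.contains c then a.modify c 0 (· + 1) else a.insert c 1)
      PySem.Dict.empty = PySem.Dict.counter l := by
  have hstep : (fun (a : PySem.Dict Char Int) (c : Char) =>
      if a.contains c then a.modify c 0 (· + 1) else a.insert c 1)
      = fun a c => a.insert c (a.getD c 0 + 1) := by
    funext a c
    by_cases h : a.contains c = true
    · simp [h, PySem.Dict.modify]
    · have h' : a.contains c = false := by simpa using h
      simp [h', pv_getD_not_contains a c 0 h']
  rw [hstep, PySem.Dict.foldl_insert_getD_add_one_eq_counter]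

-- ===== VERDICT (by name: the statement is the Claim_ definition above) =====
theorem combine_answers_part_2_spec : Claim_equal_combine_answers_part_2 := by
  intro answers size _
  unfold Spec_combine_answers_part_2 combine_answers_part_2 combine_answers_part_2_alt
  set l := answers.toList with hl
  rw [pv_build_eq_counter l, PySem.Dict.foldl_insert_getD_add_one_eq_counter]
  rw [pv_loop2 size l (PySem.Dict.counter l) 0
      (by intro _ c _; rw [PySem.Dict.getD_counter]; omega)]
  rw [PySem.List.foldl_count_if]
  rw [PySem.Dict.values_eq_map_keys _ (PySem.Dict.nodup_keys_counter l) 0,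
      PySem.Dict.keys_counter, List.countP_map]
  simp [Function.comp_def, PySem.Dict.getD_counter]
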